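-- pv_equiv track=rewrite | github.com/gradampl/MONTY | Lab_3/cag.py | set_year
-- ===== SOURCE A (Python) =====
-- def set_year(user_input):
--     year = None
--     if int(user_input[2]) == 8 or int(user_input[2]) == 9:
--         year = '18' + str(user_input[0]) + str(user_input[1])
--     else:
--         i = 0
--         k = 0
--         while i <= 6:
--             if int(user_input[2]) == i or int(user_input[2]) == i + 1:
--                 year = str(int(19 + (i - k))) + str(user_input[0]) + str(user_input[1])
--                 break
--             k += 1
--             i += 2
--     return year
-- ===== SOURCE B (Python) =====
-- def set_year(user_input):
--     d = int(user_input[2])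
--     if 8 <= d <= 9:
--         prefix = '18'
--     elif 0 <= d <= 7:
--         prefix = str(19 + d // 2)
--     else:
--         return None
--     return prefix + str(user_input[0]) + str(user_input[1])
-- ===== Notes on version B (the rewrite author's own statement) =====
-- stated objective: simpler
-- what changed: Replaces the while loop with its i/k counters and break by a single closed-form computation of the century prefix (19 + d//2, or '18' for d in 8..9).
import Mathlib
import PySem

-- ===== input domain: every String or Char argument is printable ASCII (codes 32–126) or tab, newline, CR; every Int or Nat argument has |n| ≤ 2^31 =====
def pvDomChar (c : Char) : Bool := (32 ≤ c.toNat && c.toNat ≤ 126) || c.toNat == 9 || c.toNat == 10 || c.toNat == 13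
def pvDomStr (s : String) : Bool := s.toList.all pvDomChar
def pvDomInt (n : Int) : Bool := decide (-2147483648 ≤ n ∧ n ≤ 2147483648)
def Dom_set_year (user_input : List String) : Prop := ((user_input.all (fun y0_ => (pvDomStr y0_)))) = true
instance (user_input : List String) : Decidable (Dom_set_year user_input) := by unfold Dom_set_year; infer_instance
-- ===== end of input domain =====

-- B replaces A's while loop (counters i, k and a break) by a closed-form prefix
-- 19 + d // 2 (and '18' for d = 8, 9); objective: simpler.

-- ===== PORT A =====
-- the while loop: i runs 0,2,4,6 with k = i/2; returns on d == i or i+1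
def setYearLoopA (d : Int) (x0 x1 : String) (i k : Int) : Option String :=
  if _h : i ≤ 6 then
    if d == i || d == i + 1 then
      some (PySem.Int.toStr (19 + (i - k)) ++ x0 ++ x1)
    else
      setYearLoopA d x0 x1 (i + 2) (k + 1)
  else none
termination_by (7 - i).toNat
decreasing_by omega

def set_year (user_input : List String) : Option String :=
  match PySem.List.pyGet? user_input 2 with
  | none => none  -- IndexError: excluded by Pre_set_year
  | some s2 =>
    match PySem.Int.ofStr? s2 with
    | none => none  -- ValueError: excluded by Pre_set_year
    | some d =>
      match PySem.List.pyGet? user_input 0, PySem.List.pyGet? user_input 1 with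
      | some x0, some x1 =>
        if d == 8 || d == 9 then some ("18" ++ x0 ++ x1)
        else setYearLoopA d x0 x1 0 0
      | _, _ => none  -- unreachable under Pre_set_year (length ≥ 3)

-- ===== PORT B =====
def set_year_alt (user_input : List String) : Option String :=
  (PySem.List.pyGet? user_input 2).bind fun s2 =>      -- IndexError → none, excluded by Pre_
  (PySem.Int.ofStr? s2).bind fun d =>                  -- ValueError → none, excluded by Pre_
  (if 8 ≤ d ∧ d ≤ 9 then some "18"
   else if 0 ≤ d ∧ d ≤ 7 then some (PySem.Int.toStr (19 + PySem.Int.floordiv d 2))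
   else none).bind fun prefix_ =>
  (PySem.List.pyGet? user_input 0).bind fun x0 =>
  (PySem.List.pyGet? user_input 1).bind fun x1 =>
  some (prefix_ ++ x0 ++ x1)

-- ===== PRECONDITION & SPEC =====
-- Pre_ excludes exactly the inputs where Python A raises: lists shorter than 3
-- (IndexError) and a third element that int() cannot parse (ValueError).
def Pre_set_year (user_input : List String) : Prop :=
  3 ≤ user_input.length ∧
  (PySem.Int.ofStr? (user_input.getD 2 "")).isSome = true
instance (user_input : List String) : Decidable (Pre_set_year user_input) := by
  unfold Pre_set_year; infer_instance

def pvWitness_set_year : List String := ["9", "5", "8"]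

def Spec_set_year (user_input : List String) (out : Option String) : Prop := out = set_year_alt user_input
instance (user_input : List String) (out : Option String) : Decidable (Spec_set_year user_input out) := by unfold Spec_set_year; infer_instance

-- ===== CLAIM (what is proved, stated in full; the proofs are below) =====
def Claim_equal_set_year : Prop := ∀ (user_input : List String), Dom_set_year user_input → Pre_set_year user_input → Spec_set_year user_input (set_year user_input)

-- ===== LEMMAS AND PROOFS =====

-- the loop, entered with d ∉ {8,9}, computes the closed form
theorem setYearLoopA_closed (d : Int) (x0 x1 : String) (hd : ¬(d = 8 ∨ d = 9)) :
    setYearLoopA d x0 x1 0 0 =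
      if 0 ≤ d ∧ d ≤ 7 then
        some (PySem.Int.toStr (19 + PySem.Int.floordiv d 2) ++ x0 ++ x1)
      else none := by
  by_cases h : 0 ≤ d ∧ d ≤ 7
  · obtain ⟨h0, h7⟩ := h
    interval_cases d <;> simp_all <;>
      (rw [setYearLoopA]; rw [setYearLoopA]; rw [setYearLoopA]; rw [setYearLoopA]; norm_num)
  · rw [setYearLoopA, setYearLoopA, setYearLoopA, setYearLoopA, setYearLoopA]
    rw [if_neg h]
    norm_num
    rw [if_neg (by omega), if_neg (by omega), if_neg (by omega), if_neg (by omega)]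

-- ===== VERDICT (by name: the statement is the Claim_ definition above) =====
theorem set_year_spec : Claim_equal_set_year := by
  intro user_input _hdom hpre
  unfold Spec_set_year set_year set_year_alt
  obtain ⟨hlen, _⟩ := hpre
  match user_input, hlen with
  | s0 :: s1 :: s2 :: rest, _ =>
    simp only [show ((2:Int) = ((2:Nat):Int)) from rfl, show ((0:Int) = ((0:Nat):Int)) from rfl,
      show ((1:Int) = ((1:Nat):Int)) from rfl, PySem.List.pyGet?_natCast]
    simp only [List.getElem?_cons_succ, List.getElem?_cons_zero, Option.bind_some]
    cases hparse : PySem.Int.ofStr? s2 with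
    | none => rfl
    | some d =>
      simp only [Option.bind_some]
      by_cases h89 : d = 8 ∨ d = 9
      · have hb : (d == 8 || d == 9) = true := by
          rcases h89 with h | h <;> simp [h]
        rw [if_pos hb, if_pos (by omega : 8 ≤ d ∧ d ≤ 9)]
        simp only [Option.bind_some]
      · have hb : (d == 8 || d == 9) = false := by
          simp only [Bool.or_eq_false_iff, beq_eq_false_iff_ne]
          exact ⟨fun h => h89 (Or.inl h), fun h => h89 (Or.inr h)⟩
        rw [if_neg (by simp [hb]), if_neg (by omega : ¬(8 ≤ d ∧ d ≤ 9))]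
        rw [show ((0:Nat):Int) = (0:Int) from rfl]
        rw [setYearLoopA_closed d s0 s1 h89]
        by_cases h07 : 0 ≤ d ∧ d ≤ 7
        · rw [if_pos h07, if_pos h07]
          simp only [Option.bind_some, show ((2:Nat):Int) = (2:Int) from rfl]
        · rw [if_neg h07, if_neg h07]
          rfl
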